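-- pv_equiv track=rewrite | github.com/programteam-cn/rm-notes-analysis | main.py | notes_are_dnp_only
-- ===== SOURCE A (Python) =====
-- def notes_are_dnp_only(notes) -> bool:
--     """Return True if every note represents a Did Not Pick (DNP) status."""
--     cleaned = []
--     for note in notes:
--         content = str(note.get("content", "")).strip()
--         if not content:
--             continue
--         normalized = content.upper()
--         cleaned.append(normalized)
--
--     if not cleaned:
--         return False
--
--     def is_dnp_entry(text: str) -> bool:
--         stripped = text.lstrip()
--         return stripped.startswith("DNP")
--
--     return all(is_dnp_entry(entry) for entry in cleaned)
-- ===== SOURCE B (Python) =====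
-- def notes_are_dnp_only(notes) -> bool:
--     """Return True if every note represents a Did Not Pick (DNP) status."""
--     found = False
--     for note in notes:
--         content = str(note.get("content", "")).strip()
--         if not content:
--             continue
--         found = True
--         if not content.upper().startswith("DNP"):
--             return False
--     return found
-- ===== Notes on version B (the rewrite author's own statement) =====
-- stated objective: simpler
-- what changed: Fused A's two passes (build a cleaned list, then all()) into a single early-exit loop with a boolean flag, dropping the intermediate list and the inner is_dnp_entry helper.
import Mathlib
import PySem

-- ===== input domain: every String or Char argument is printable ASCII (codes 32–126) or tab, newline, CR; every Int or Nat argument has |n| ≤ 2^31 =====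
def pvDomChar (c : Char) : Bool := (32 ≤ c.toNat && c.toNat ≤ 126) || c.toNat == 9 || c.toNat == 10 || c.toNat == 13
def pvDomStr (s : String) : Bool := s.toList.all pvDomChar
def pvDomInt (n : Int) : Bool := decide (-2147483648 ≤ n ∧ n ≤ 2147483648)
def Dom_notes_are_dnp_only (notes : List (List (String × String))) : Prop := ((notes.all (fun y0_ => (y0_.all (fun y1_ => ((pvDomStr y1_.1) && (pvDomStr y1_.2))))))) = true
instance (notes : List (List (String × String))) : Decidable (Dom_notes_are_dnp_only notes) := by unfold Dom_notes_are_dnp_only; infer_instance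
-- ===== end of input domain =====

-- B fuses A's two passes (build a cleaned list, then all()) into one early-exit loop with a
-- boolean flag; same values, no intermediate list — objective: simpler.


-- note.get("content", "") on the dict-as-association-list: first match, default ""
def pvGetContent (note : List (String × String)) : String :=
  ((note.find? (fun p => p.1 == "content")).map Prod.snd).getD ""

-- ===== PORT A =====
-- is_dnp_entry helper of A
def pvIsDnpEntry (text : String) : Bool :=
  PySem.Str.startswith (PySem.Str.lstrip text) "DNP"

def notes_are_dnp_only (notes : List (List (String × String))) : Bool :=
  let cleaned := notes.foldl (fun cleaned note =>
    let content := PySem.Str.strip (pvGetContent note)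
    if content = "" then cleaned
    else cleaned ++ [PySem.Str.upper content]) []
  if cleaned = [] then false
  else cleaned.all (fun entry => pvIsDnpEntry entry)

-- ===== PORT B =====
-- the single early-exit loop of Source B, carrying the `found` flag
def pvDnpGo (found : Bool) : List (List (String × String)) → Bool
  | [] => found
  | note :: rest =>
    let content := PySem.Str.strip (pvGetContent note)
    if content = "" then pvDnpGo found rest
    else if PySem.Str.startswith (PySem.Str.upper content) "DNP" then pvDnpGo true rest
    else false

def notes_are_dnp_only_alt (notes : List (List (String × String))) : Bool :=
  pvDnpGo false notes

-- ===== PRECONDITION & SPEC =====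
def Spec_notes_are_dnp_only (notes : List (List (String × String))) (out : Bool) : Prop := out = notes_are_dnp_only_alt notes
instance (notes : List (List (String × String))) (out : Bool) : Decidable (Spec_notes_are_dnp_only notes out) := by unfold Spec_notes_are_dnp_only; infer_instance

-- ===== CLAIM (what is proved, stated in full; the proofs are below) =====
def Claim_equal_notes_are_dnp_only : Prop := ∀ (notes : List (List (String × String))), Dom_notes_are_dnp_only notes → Spec_notes_are_dnp_only notes (notes_are_dnp_only notes)

-- ===== LEMMAS AND PROOFS =====

lemma isspace_eq_false_of (c : Char) (h1 : 65 ≤ c.toNat) (h2 : c.toNat ≤ 122) :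
    PySem.Chars.isspace c = false := by
  unfold PySem.Chars.isspace
  simp only [Bool.or_eq_false_iff, Bool.and_eq_false_iff, decide_eq_false_iff_not]
  omega

lemma isspace_upperChar (c : Char) :
    PySem.Chars.isspace (PySem.Chars.upperChar c) = PySem.Chars.isspace c := by
  unfold PySem.Chars.upperChar
  split_ifs with h
  · have hc : 97 ≤ c.toNat ∧ c.toNat ≤ 122 := by
      unfold PySem.Chars.islower at h
      simp [Char.le_def] at h
      exact ⟨h.1, h.2⟩
    have hv : (Char.ofNat (c.toNat - 32)).toNat = c.toNat - 32 := by
      rw [Char.toNat_ofNat]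
      have : (c.toNat - 32).isValidChar := by left; omega
      simp [this]
    rw [isspace_eq_false_of _ (by omega) (by omega),
        isspace_eq_false_of c (by omega) (by omega)]
  · rfl

-- a left-stripped list stays left-stripped after upper-casing
lemma lstrip_upper_of_lstripped (l : List Char) (h : PySem.Chars.lstrip l = l) :
    PySem.Chars.lstrip (PySem.Chars.upper l) = PySem.Chars.upper l := by
  cases l with
  | nil => rfl
  | cons c t =>
    unfold PySem.Chars.lstrip PySem.Chars.upper at *
    have hc : PySem.Chars.isspace c = false := by
      by_contra hcc
      rw [List.dropWhile_cons] at h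
      simp at hcc
      rw [if_pos hcc] at h
      have := List.length_dropWhile_le PySem.Chars.isspace t
      have := congrArg List.length h
      simp at this
      omega
    rw [List.map_cons, List.dropWhile_cons, isspace_upperChar, hc]
    simp

-- lstrip ∘ strip = strip
lemma lstrip_strip (l : List Char) :
    PySem.Chars.lstrip (PySem.Chars.strip l) = PySem.Chars.strip l := by
  unfold PySem.Chars.strip PySem.Chars.rstrip PySem.Chars.lstrip
  have hmls : List.dropWhile PySem.Chars.isspace (List.dropWhile PySem.Chars.isspace l) =
      List.dropWhile PySem.Chars.isspace l := List.dropWhile_idempotent _ _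
  generalize hgen : List.dropWhile PySem.Chars.isspace l = m at hmls ⊢
  cases hm : (List.dropWhile PySem.Chars.isspace m.reverse).reverse with
  | nil => simp
  | cons c t =>
    -- (dropWhile p m.reverse).reverse is a prefix of m, so its head c is m's head;
    -- m is already left-stripped, so c is not a space
    have hpre : (List.dropWhile PySem.Chars.isspace m.reverse).reverse <+: m := by
      have : List.dropWhile PySem.Chars.isspace m.reverse <:+ m.reverse :=
        List.dropWhile_suffix _
      have := List.reverse_prefix.mpr this
      simpa using this
    rw [hm] at hpre
    obtain ⟨r, hr⟩ := hpre
    have hc : PySem.Chars.isspace c = false := by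
      by_contra hcc
      simp at hcc
      rw [← hr, List.dropWhile_append, List.dropWhile_cons, if_pos hcc] at hmls
      split at hmls
      · have hlen := congrArg List.length hmls
        have h2 := List.length_dropWhile_le PySem.Chars.isspace r
        simp at hlen
        omega
      · have hlen := congrArg List.length hmls
        have h2 := List.length_dropWhile_le PySem.Chars.isspace t
        simp at hlen
        omega
    rw [List.dropWhile_cons, hc]
    simp

-- A's per-entry test equals B's test on the entries A actually stores
lemma isDnpEntry_upper_strip (s : String) :
    pvIsDnpEntry (PySem.Str.upper (PySem.Str.strip s)) =
      PySem.Str.startswith (PySem.Str.upper (PySem.Str.strip s)) "DNP" := by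
  unfold pvIsDnpEntry PySem.Str.startswith PySem.Str.lstrip PySem.Str.upper PySem.Str.strip
  simp only [String.toList_ofList]
  rw [lstrip_upper_of_lstripped _ (lstrip_strip s.toList)]

-- proof-local, let-free form of A's fold step (definitionally equal to the body of port A)
def pvStep (cleaned : List String) (note : List (String × String)) : List String :=
  if PySem.Str.strip (pvGetContent note) = "" then cleaned
  else cleaned ++ [PySem.Str.upper (PySem.Str.strip (pvGetContent note))]

lemma pvStep_eq : (fun (cleaned : List String) (note : List (String × String)) =>
    let content := PySem.Str.strip (pvGetContent note)
    if content = "" then cleaned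
    else cleaned ++ [PySem.Str.upper content]) = pvStep := rfl

lemma pvDnpGo_cons (found : Bool) (note : List (String × String))
    (rest : List (List (String × String))) :
    pvDnpGo found (note :: rest) =
      (if PySem.Str.strip (pvGetContent note) = "" then pvDnpGo found rest
       else if PySem.Str.startswith (PySem.Str.upper (PySem.Str.strip (pvGetContent note))) "DNP"
         then pvDnpGo true rest else false) := rfl

lemma foldl_step_ne_nil (notes : List (List (String × String))) (acc : List String)
    (h : acc ≠ []) : notes.foldl pvStep acc ≠ [] := by
  induction notes generalizing acc with
  | nil => exact h
  | cons n rest ih =>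
    apply ih
    unfold pvStep
    split
    · exact h
    · simp

lemma foldl_step_all_false (notes : List (List (String × String))) (acc : List String)
    (h : acc.all pvIsDnpEntry = false) :
    (notes.foldl pvStep acc).all pvIsDnpEntry = false := by
  induction notes generalizing acc with
  | nil => exact h
  | cons n rest ih =>
    apply ih
    unfold pvStep
    split
    · exact h
    · simp [List.all_append, h]

-- the loop invariant: A's "fold then test" equals B's flagged loop
lemma main_inv (notes : List (List (String × String))) (acc : List String) (found : Bool)
    (hf : (found = true) ↔ acc ≠ [])
    (ha : acc.all pvIsDnpEntry = true) :
    (if notes.foldl pvStep acc = [] then false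
     else (notes.foldl pvStep acc).all pvIsDnpEntry) = pvDnpGo found notes := by
  induction notes generalizing acc found with
  | nil =>
    simp only [List.foldl_nil, pvDnpGo]
    by_cases h : acc = []
    · have hfd : found = false := by
        cases found
        · rfl
        · exact absurd (hf.mp rfl) (by simp [h])
      simp [h, hfd]
    · simp [h, ha, hf.mpr h]
  | cons note rest ih =>
    rw [List.foldl_cons, pvDnpGo_cons]
    by_cases hc : PySem.Str.strip (pvGetContent note) = ""
    · rw [show pvStep acc note = acc from by simp [pvStep, hc], if_pos hc]
      exact ih acc found hf ha
    · have hstep : pvStep acc note =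
          acc ++ [PySem.Str.upper (PySem.Str.strip (pvGetContent note))] := by
        simp [pvStep, hc]
      rw [hstep, if_neg hc]
      by_cases hd : PySem.Str.startswith (PySem.Str.upper (PySem.Str.strip (pvGetContent note))) "DNP" = true
      · rw [if_pos hd]
        apply ih _ true
        · simp
        · simp only [List.all_append, List.all_cons, List.all_nil, ha,
            isDnpEntry_upper_strip, hd]
          rfl
      · rw [if_neg hd]
        have hbad : (acc ++ [PySem.Str.upper (PySem.Str.strip (pvGetContent note))]).all pvIsDnpEntry = false := by
          simp only [List.all_append, List.all_cons, List.all_nil, ha,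
            isDnpEntry_upper_strip]
          simp at hd
          simp [hd]
        rw [if_neg (foldl_step_ne_nil _ _ (by simp)),
            foldl_step_all_false _ _ hbad]

-- ===== VERDICT (by name: the statement is the Claim_ definition above) =====
theorem notes_are_dnp_only_spec : Claim_equal_notes_are_dnp_only := by
  intro notes _
  unfold Spec_notes_are_dnp_only notes_are_dnp_only notes_are_dnp_only_alt
  rw [pvStep_eq]
  exact main_inv notes [] false (by simp) (by simp)
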